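-- pv_equiv track=rewrite | github.com/lovehhf/newcoder_py | 剑指offer/递归和循环/变态跳台阶.py | jumpFloorII
-- ===== SOURCE A (Python) =====
-- def jumpFloorII(number):
--     if number==1:
--         return 1
--     if number==2:
--         return 2
--     l = [1,2]
--     for i in range(2,number):
--         l.append(sum(l)+1)
--
--     return l[-1]
-- ===== SOURCE B (Python) =====
-- def jumpFloorII(number):
--     return 1 << (number - 1)
-- ===== Notes on version B (the rewrite author's own statement) =====
-- stated objective: faster
-- what changed: Replaces the quadratic loop that appends sum(l)+1 (re-summing a growing list each step) with the closed form 2^(number-1) computed as a single shift.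
-- outside the precondition, e.g. on jumpFloorII(0): A returns 2, B raises ValueError; on jumpFloorII(-3): A returns 2, B raises ValueError
import Mathlib
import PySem

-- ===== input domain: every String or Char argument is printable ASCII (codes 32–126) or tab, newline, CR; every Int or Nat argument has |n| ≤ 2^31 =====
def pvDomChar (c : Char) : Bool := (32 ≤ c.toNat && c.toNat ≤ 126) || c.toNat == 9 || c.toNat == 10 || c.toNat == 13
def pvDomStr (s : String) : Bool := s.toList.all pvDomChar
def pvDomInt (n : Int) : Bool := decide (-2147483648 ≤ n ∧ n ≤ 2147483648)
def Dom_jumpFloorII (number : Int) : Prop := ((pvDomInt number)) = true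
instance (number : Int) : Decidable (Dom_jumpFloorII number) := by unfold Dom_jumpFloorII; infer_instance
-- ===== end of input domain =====

-- B replaces A's quadratic append-sum loop with the closed form 2^(number-1) (one shift): asymptotically faster.

-- ===== PORT A =====
def jumpFloorII (number : Int) : Int :=
  if number = 1 then 1
  else if number = 2 then 2
  else
    let l := (PySem.List.pyRange 2 number 1).foldl (fun l (_ : Int) => l ++ [l.sum + 1]) [1, 2]
    -- return l[-1]; l starts as [1,2] and only grows, so it is never empty and the default is dead
    PySem.List.pyGetD l (-1) 0

-- ===== PORT B =====
-- 1 << (number - 1); exact for number ≥ 1 (Pre_), where the shift amount is nonnegative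
def jumpFloorII_alt (number : Int) : Int := 1 * 2 ^ (number - 1).toNat

-- ===== PRECONDITION & SPEC =====
-- On number ≤ 0 A returns 2 (leftover loop state l = [1,2]); B's negative shift raises ValueError, so Pre_ excludes number ≤ 0.
def Pre_jumpFloorII (number : Int) : Prop := 1 ≤ number
instance (number : Int) : Decidable (Pre_jumpFloorII number) := by unfold Pre_jumpFloorII; infer_instance
def pvWitness_jumpFloorII : Int := 5

def Spec_jumpFloorII (number : Int) (out : Int) : Prop := out = jumpFloorII_alt number
instance (number : Int) (out : Int) : Decidable (Spec_jumpFloorII number out) := by unfold Spec_jumpFloorII; infer_instance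

-- ===== CLAIM (what is proved, stated in full; the proofs are below) =====
def Claim_equal_jumpFloorII : Prop := ∀ (number : Int), Dom_jumpFloorII number → Pre_jumpFloorII number → Spec_jumpFloorII number (jumpFloorII number)

-- ===== LEMMAS AND PROOFS =====

-- the loop body ignores the loop variable, so the foldl is an iterate of the body
theorem foldl_const_iterate {α β : Type} (f : β → β) :
    ∀ (xs : List α) (init : β), xs.foldl (fun b _ => f b) init = f^[xs.length] init := by
  intro xs
  induction xs with
  | nil => intro init; rfl
  | cons x xs ih =>
    intro init
    simp [List.foldl_cons, ih, Function.iterate_succ_apply]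

-- invariant of A's loop body iterated m times from [1,2]
theorem body_iterate_inv (m : Nat) :
    ((fun (l : List Int) => l ++ [l.sum + 1])^[m] [1, 2]).sum = 2 ^ (m + 2) - 1 ∧
    ((fun (l : List Int) => l ++ [l.sum + 1])^[m] [1, 2]).getLast? = some (2 ^ (m + 1)) := by
  induction m with
  | zero => simp
  | succ m ih =>
    obtain ⟨hs, _⟩ := ih
    rw [Function.iterate_succ_apply']
    constructor
    · simp [hs]; ring
    · simp [hs]

theorem jumpFloorII_spec : Claim_equal_jumpFloorII := by
  intro number _ hpre
  unfold Spec_jumpFloorII jumpFloorII jumpFloorII_alt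
  unfold Pre_jumpFloorII at hpre
  by_cases h1 : number = 1
  · subst h1; simp
  · by_cases h2 : number = 2
    · subst h2; decide
    · simp only [h1, h2, if_false]
      have h3 : 3 ≤ number := by omega
      rw [foldl_const_iterate]
      rw [PySem.List.length_pyRange_one]
      set m := (number - 2).toNat with hm
      obtain ⟨_, hlast⟩ := body_iterate_inv m
      set l := ((fun (l : List Int) => l ++ [l.sum + 1])^[m] [1, 2]) with hl
      have hne : l ≠ [] := by
        intro hnil; rw [hnil] at hlast; simp at hlast
      rw [PySem.List.pyGetD_neg_one l 0 hne]
      have : l.getLast hne = 2 ^ (m + 1) := by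
        have := List.getLast?_eq_some_getLast (l := l) hne
        rw [this] at hlast
        exact Option.some.inj hlast
      rw [this]
      have : (number - 1).toNat = m + 1 := by omega
      rw [this]
      ring
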